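-- pv_equiv track=rewrite | github.com/nmlorg/metabot | metabot/util/protobuf.py | get_varint
-- ===== SOURCE A (Python) =====
-- def get_varint(data):
--     """Decode a simple varint."""
--
--     val = exp = 0
--     while data:
--         chunk = data.pop(0)
--         val += (chunk & 0x7f) << (7 * exp)
--         if not chunk & 0x80:
--             break
--         exp += 1
--     return val
-- ===== SOURCE B (Python) =====
-- def get_varint(data):
--     """Decode a simple varint."""
--     end = len(data)
--     for i, chunk in enumerate(data):
--         if not chunk & 0x80:
--             end = i + 1
--             break
--     val = sum((chunk & 0x7f) << (7 * i) for i, chunk in enumerate(data[:end]))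
--     del data[:end]
--     return val
-- ===== Notes on version B (the rewrite author's own statement) =====
-- stated objective: alternative
-- what changed: Replaces A's while-loop of repeated data.pop(0) with a single index scan that finds the end of the varint, a one-pass sum over the consumed prefix, and one del data[:end]; avoids quadratic pop(0) shifting, though random inputs stop after few bytes so a timing run did not confirm a speed-up.
import Mathlib
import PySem

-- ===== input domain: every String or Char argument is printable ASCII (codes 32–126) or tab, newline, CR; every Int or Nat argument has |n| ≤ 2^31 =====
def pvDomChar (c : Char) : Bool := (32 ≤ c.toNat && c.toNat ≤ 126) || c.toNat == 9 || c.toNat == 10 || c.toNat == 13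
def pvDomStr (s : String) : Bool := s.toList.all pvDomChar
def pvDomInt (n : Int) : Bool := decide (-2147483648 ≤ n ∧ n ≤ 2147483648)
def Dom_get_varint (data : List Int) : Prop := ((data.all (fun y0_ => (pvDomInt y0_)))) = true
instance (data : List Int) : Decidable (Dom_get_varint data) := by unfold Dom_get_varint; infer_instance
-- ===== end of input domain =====

-- B replaces A's repeated data.pop(0) loop with an index scan that finds the end of
-- the varint, a one-pass sum over that prefix, and one del data[:end]; both Pythons
-- mutate `data` identically (consumed prefix removed); theorems are about the RETURN value.

-- ===== PORT A =====
-- A's while loop: pop the head, accumulate, break when the continuation bit is clear.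
def get_varint_loop : List Int → Int → Nat → Int
  | [], val, _ => val
  | chunk :: rest, val, exp =>
      let val := val + (PySem.Int.band chunk 0x7f) <<< (7 * exp)
      if PySem.Int.band chunk 0x80 = 0 then val
      else get_varint_loop rest val (exp + 1)

def get_varint (data : List Int) : Int := get_varint_loop data 0 0

-- ===== PORT B =====
-- B's first loop: index one past the first chunk with the continuation bit clear,
-- defaulting to len(data).
def varint_end : List Int → Nat
  | [] => 0
  | chunk :: rest =>
      if PySem.Int.band chunk 0x80 = 0 then 1 else 1 + varint_end rest

def get_varint_alt (data : List Int) : Int :=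
  let e := varint_end data
  (((PySem.List.enumerate (data.take e)).map
      (fun p => (PySem.Int.band p.2 0x7f) <<< ((7 : Nat) * p.1.toNat))).sum)

-- ===== PRECONDITION & SPEC =====
def Spec_get_varint (data : List Int) (out : Int) : Prop := out = get_varint_alt data
instance (data : List Int) (out : Int) : Decidable (Spec_get_varint data out) := by unfold Spec_get_varint; infer_instance

-- ===== CLAIM (what is proved, stated in full; the proofs are below) =====
def Claim_equal_get_varint : Prop := ∀ (data : List Int), Dom_get_varint data → Spec_get_varint data (get_varint data)

-- ===== LEMMAS AND PROOFS =====

-- common reference sum: shifted terms of xs starting at exponent e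
def varint_sum : List Int → Nat → Int
  | [], _ => 0
  | c :: r, e => (PySem.Int.band c 0x7f) <<< (7 * e) + varint_sum r (e + 1)

lemma loop_eq (data : List Int) : ∀ (val : Int) (e : Nat),
    get_varint_loop data val e = val + varint_sum (data.take (varint_end data)) e := by
  induction data with
  | nil => intro val e; simp [get_varint_loop, varint_end, varint_sum]
  | cons c r ih =>
    intro val e
    by_cases h : PySem.Int.band c 0x80 = 0
    · simp [get_varint_loop, varint_end, varint_sum, h]
    · rw [show get_varint_loop (c :: r) val e
            = get_varint_loop r (val + (PySem.Int.band c 0x7f) <<< (7 * e)) (e + 1) from by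
          simp [get_varint_loop, h]]
      rw [ih, show varint_end (c :: r) = varint_end r + 1 from by
          simp [varint_end, h, Nat.add_comm]]
      rw [List.take_succ_cons]
      simp only [varint_sum]
      ring

lemma enum_sum (xs : List Int) : ∀ (s : Nat),
    ((PySem.List.enumerate xs (s : Int)).map
      (fun p => (PySem.Int.band p.2 0x7f) <<< ((7 : Nat) * p.1.toNat))).sum
    = varint_sum xs s := by
  induction xs with
  | nil => intro s; simp [PySem.List.enumerate_nil, varint_sum]
  | cons c r ih =>
    intro s
    rw [PySem.List.enumerate_cons]
    simp only [List.map_cons, List.sum_cons, Int.toNat_natCast]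
    have h1 : ((s : Int) + 1) = ((s + 1 : Nat) : Int) := by push_cast; ring
    rw [h1, ih]
    simp only [varint_sum]

-- ===== VERDICT (by name: the statement is the Claim_ definition above) =====
theorem get_varint_spec : Claim_equal_get_varint := by
  intro data _
  show get_varint data = get_varint_alt data
  rw [get_varint, loop_eq, get_varint_alt]
  have := enum_sum (data.take (varint_end data)) 0
  simpa using this.symm
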